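-- pv_equiv track=rewrite | github.com/brunohenderyckx/clustal-output-aligner | functions.py | soft_check
-- ===== SOURCE A (Python) =====
-- def soft_check(cell, ref_cell, matching_rules=[("D", "E", "N", "Q"),
--                                                ("K", "R", "H"),
--                                                ("F", "W", "Y"),
--                                                ("V", "I", "L", "M"),
--                                                ("S", "T")]):
--     """ Checks if the cell value matches the matching list of tuples of the reference cell
--
--     Args:
--         cell (string): A row of Clustal output
--         ref_cell (string): A row of Clustal output
--         matching_dict (dictionary): A row of Clustal output
--
--     Returns:
--         Bool: Returns True if the values or soft matches
--     """
--     for group in matching_rules: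
--         if cell in group and ref_cell in group:
--             return True
--     else:
--         return False
-- ===== SOURCE B (Python) =====
-- def soft_check(cell, ref_cell, matching_rules=[("D", "E", "N", "Q"),
--                                                ("K", "R", "H"),
--                                                ("F", "W", "Y"),
--                                                ("V", "I", "L", "M"),
--                                                ("S", "T")]):
--     """Builds a residue -> set-of-group-indices table once, then answers by
--     intersecting the two index sets (non-empty intersection = soft match)."""
--     table = {}
--     for i, group in enumerate(matching_rules):
--         for r in group:
--             table.setdefault(r, set()).add(i)
--     return bool(table.get(cell, set()) & table.get(ref_cell, set()))
-- ===== Notes on version B (the rewrite author's own statement) =====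
-- stated objective: idiomatic
-- what changed: B replaces A's per-call early-return scan over groups by building a residue-to-set-of-group-indices lookup table once (setdefault/add over enumerate) and answering with a set intersection of the two index sets.
import Mathlib
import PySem

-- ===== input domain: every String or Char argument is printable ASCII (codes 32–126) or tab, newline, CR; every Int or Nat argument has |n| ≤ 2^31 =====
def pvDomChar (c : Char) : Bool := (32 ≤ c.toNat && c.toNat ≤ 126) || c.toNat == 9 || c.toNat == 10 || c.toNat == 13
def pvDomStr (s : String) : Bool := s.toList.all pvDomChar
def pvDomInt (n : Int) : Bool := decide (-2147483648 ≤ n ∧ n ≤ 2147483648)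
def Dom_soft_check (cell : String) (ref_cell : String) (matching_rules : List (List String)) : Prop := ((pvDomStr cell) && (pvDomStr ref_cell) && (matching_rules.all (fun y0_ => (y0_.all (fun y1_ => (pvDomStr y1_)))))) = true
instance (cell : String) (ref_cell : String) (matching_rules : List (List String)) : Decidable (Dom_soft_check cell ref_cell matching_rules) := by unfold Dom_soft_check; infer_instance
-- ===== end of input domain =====

-- B builds a residue -> set-of-group-indices table once and intersects two index
-- sets, instead of A's early-return scan over the groups (objective: idiomatic).

-- ===== PORT A =====
-- the 'for group in matching_rules: if … return True / else return False' loop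
def softCheckLoop (cell ref_cell : String) : List (List String) → Bool
  | [] => false
  | g :: rest =>
      if g.contains cell && g.contains ref_cell then true
      else softCheckLoop cell ref_cell rest

def soft_check (cell : String) (ref_cell : String) (matching_rules : List (List String)) : Bool :=
  softCheckLoop cell ref_cell matching_rules

-- ===== PORT B =====
-- 'for i, group in enumerate(matching_rules): for r in group: table.setdefault(r, set()).add(i)'
def softCheckTable (matching_rules : List (List String)) : PySem.Dict String (PySem.Set Int) :=
  (PySem.List.enumerate matching_rules).foldl
    (fun t p => p.2.foldl
      (fun t r => t.insert r (PySem.Set.add (t.getD r PySem.Set.empty) p.1)) t)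
    PySem.Dict.empty

def soft_check_alt (cell : String) (ref_cell : String) (matching_rules : List (List String)) : Bool :=
  let table := softCheckTable matching_rules
  -- bool(table.get(cell, set()) & table.get(ref_cell, set()))
  !((PySem.Set.inter (table.getD cell PySem.Set.empty) (table.getD ref_cell PySem.Set.empty)).isEmpty)

-- ===== PRECONDITION & SPEC =====
def Spec_soft_check (cell : String) (ref_cell : String) (matching_rules : List (List String)) (out : Bool) : Prop := out = soft_check_alt cell ref_cell matching_rules
instance (cell : String) (ref_cell : String) (matching_rules : List (List String)) (out : Bool) : Decidable (Spec_soft_check cell ref_cell matching_rules out) := by unfold Spec_soft_check; infer_instance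

-- ===== CLAIM (what is proved, stated in full; the proofs are below) =====
def Claim_equal_soft_check : Prop := ∀ (cell : String) (ref_cell : String) (matching_rules : List (List String)), Dom_soft_check cell ref_cell matching_rules → Spec_soft_check cell ref_cell matching_rules (soft_check cell ref_cell matching_rules)

-- ===== LEMMAS AND PROOFS =====

-- A's loop is List.any of 'both cells in the group'
lemma softCheckLoop_eq_any (cell ref_cell : String) (l : List (List String)) :
    softCheckLoop cell ref_cell l = l.any (fun g => g.contains cell && g.contains ref_cell) := by
  induction l with
  | nil => rfl
  | cons g rest ih =>
      by_cases h : (g.contains cell && g.contains ref_cell) = true <;>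
        simp [softCheckLoop, ih]

lemma enumerate_cons (x : List String) (t : List (List String)) (s : Int) :
    PySem.List.enumerate (x :: t) s = (s, x) :: PySem.List.enumerate t (s + 1) := rfl

-- membership in an enumerated list
lemma mem_enumerate_iff (l : List (List String)) (s : Int) (p : Int × List String) :
    p ∈ PySem.List.enumerate l s ↔ ∃ n : Nat, n < l.length ∧ p = (s + n, l.getD n []) := by
  induction l generalizing s with
  | nil => simp
  | cons x t ih =>
      rw [enumerate_cons]
      constructor
      · intro hp
        rcases List.mem_cons.mp hp with h | h
        · exact ⟨0, by simp, by simpa using h⟩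
        · rcases (ih (s + 1)).mp h with ⟨n, hn, hpe⟩
          exact ⟨n + 1, by simp only [List.length_cons]; omega, by simp [hpe]; ring⟩
      · rintro ⟨n, hn, hpe⟩
        cases n with
        | zero => exact List.mem_cons.mpr (Or.inl (by simpa using hpe))
        | succ m =>
            refine List.mem_cons.mpr (Or.inr ((ih (s + 1)).mpr ⟨m, by simp only [List.length_cons] at hn; omega, ?_⟩))
            simp [hpe]; ring

-- the inner 'for r in group' fold, seen through getD
lemma inner_fold_getD (g : List String) (t : PySem.Dict String (PySem.Set Int)) (i : Int) (q : String) :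
    (g.foldl (fun t r => t.insert r (PySem.Set.add (t.getD r PySem.Set.empty) i)) t).getD q PySem.Set.empty
      = if q ∈ g then PySem.Set.add (t.getD q PySem.Set.empty) i else t.getD q PySem.Set.empty := by
  induction g generalizing t with
  | nil => simp
  | cons r g ih =>
      simp only [List.foldl_cons, ih, PySem.Dict.getD_insert, List.mem_cons]
      by_cases hqg : q ∈ g <;> by_cases hqr : q = r <;>
        simp [hqg, hqr, PySem.Set.add_of_mem, PySem.Set.mem_add]

-- membership in the table built by the outer fold
lemma mem_table_fold (l : List (Int × List String)) (t : PySem.Dict String (PySem.Set Int))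
    (q : String) (x : Int) :
    x ∈ (l.foldl (fun t p => p.2.foldl
          (fun t r => t.insert r (PySem.Set.add (t.getD r PySem.Set.empty) p.1)) t) t).getD q PySem.Set.empty
      ↔ x ∈ t.getD q PySem.Set.empty ∨ ∃ p ∈ l, q ∈ p.2 ∧ x = p.1 := by
  induction l generalizing t with
  | nil => simp
  | cons p l ih =>
      simp only [List.foldl_cons, ih, inner_fold_getD, List.mem_cons]
      by_cases h : q ∈ p.2
      · simp only [h, if_true, PySem.Set.mem_add]
        constructor
        · rintro ((hx | hx) | hx)
          · exact Or.inl hx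
          · exact Or.inr ⟨p, Or.inl rfl, h, hx⟩
          · rcases hx with ⟨p', hp', hq', hx'⟩
            exact Or.inr ⟨p', Or.inr hp', hq', hx'⟩
        · rintro (hx | ⟨p', hp' | hp', hq', hx'⟩)
          · exact Or.inl (Or.inl hx)
          · exact Or.inl (Or.inr (by rw [hp'] at hx'; exact hx'))
          · exact Or.inr ⟨p', hp', hq', hx'⟩
      · simp only [h, if_false]
        constructor
        · rintro (hx | ⟨p', hp', hq', hx'⟩)
          · exact Or.inl hx
          · exact Or.inr ⟨p', Or.inr hp', hq', hx'⟩
        · rintro (hx | ⟨p', hp' | hp', hq', hx'⟩)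
          · exact Or.inl hx
          · exact absurd hq' (by rw [hp']; exact h)
          · exact Or.inr ⟨p', hp', hq', hx'⟩
      
-- the looked-up index set, characterised
lemma mem_softCheckTable (matching_rules : List (List String)) (q : String) (x : Int) :
    x ∈ (softCheckTable matching_rules).getD q PySem.Set.empty
      ↔ ∃ n : Nat, n < matching_rules.length ∧ q ∈ matching_rules.getD n [] ∧ x = (n : Int) := by
  unfold softCheckTable
  rw [mem_table_fold]
  constructor
  · rintro (hx | ⟨p, hp, hq, hx⟩)
    · simp [PySem.Dict.getD_empty, PySem.Set.empty] at hx
    · rcases (mem_enumerate_iff _ _ _).mp hp with ⟨n, hn, hpe⟩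
      subst hpe
      exact ⟨n, hn, hq, by simpa using hx⟩
  · rintro ⟨n, hn, hq, hx⟩
    exact Or.inr ⟨((n : Int), matching_rules.getD n []),
      (mem_enumerate_iff _ _ _).mpr ⟨n, hn, by simp⟩, hq, by simpa using hx⟩

lemma isEmpty_false_iff_exists_mem {α : Type} (l : List α) :
    l.isEmpty = false ↔ ∃ x, x ∈ l := by
  cases l <;> simp

-- ===== VERDICT (by name: the statement is the Claim_ definition above) =====
theorem soft_check_spec : Claim_equal_soft_check := by
  intro cell ref_cell matching_rules _
  show soft_check cell ref_cell matching_rules = soft_check_alt cell ref_cell matching_rules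
  unfold soft_check soft_check_alt
  rw [softCheckLoop_eq_any]
  rw [Bool.eq_iff_iff]
  simp only [Bool.not_eq_true', List.any_eq_true, Bool.and_eq_true, List.contains_iff_mem]
  rw [isEmpty_false_iff_exists_mem]
  constructor
  · rintro ⟨g, hg, hc, hr⟩
    rcases List.getElem_of_mem hg with ⟨n, hn, hgn⟩
    have hgd : matching_rules.getD n [] = g := by
      rw [List.getD_eq_getElem _ _ hn, hgn]
    exact ⟨(n : Int), (PySem.Set.mem_inter _ _ _).mpr
      ⟨(mem_softCheckTable _ _ _).mpr ⟨n, hn, by rw [hgd]; exact hc, rfl⟩,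
       (mem_softCheckTable _ _ _).mpr ⟨n, hn, by rw [hgd]; exact hr, rfl⟩⟩⟩
  · rintro ⟨x, hx⟩
    rw [PySem.Set.mem_inter] at hx
    rcases hx with ⟨hxc, hxr⟩
    rcases (mem_softCheckTable _ _ _).mp hxc with ⟨n, hn, hqc, hxn⟩
    rcases (mem_softCheckTable _ _ _).mp hxr with ⟨m, hm, hqr, hxm⟩
    have hnm : n = m := by
      have : (n : Int) = (m : Int) := by rw [← hxn, ← hxm]
      exact_mod_cast this
    subst hnm
    exact ⟨matching_rules.getD n [],
      by rw [List.getD_eq_getElem _ _ hn]; exact List.getElem_mem hn, hqc, hqr⟩
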